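-- pv_equiv track=rewrite | github.com/kandi00/Math | ConvexHull.py | szelsopontok
-- ===== SOURCE A (Python) =====
-- def szelsopontok(S):
--      p = (S[0][0], S[0][1])
--      q = (S[0][0], S[0][1])
--      k = 0
--      i = 0
--      j = 0
--      for elem in S:
--           if elem[0] > q[0] :
--                q = elem
--                j = k
--           if elem[0] < p[0] :
--                p = elem
--                i = k
--           k+=1
--      return i, j
-- ===== SOURCE B (Python) =====
-- def szelsopontok(S):
--     xs = [p[0] for p in S]
--     return xs.index(min(xs)), xs.index(max(xs))
-- ===== Notes on version B (the rewrite author's own statement) =====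
-- stated objective: idiomatic
-- what changed: Replaces A's fused single-pass loop with five accumulator variables by three independent built-in passes on the x-coordinate list: xs.index(min(xs)) and xs.index(max(xs)), relying on min/max/index returning the first extremal occurrence.
import Mathlib
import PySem

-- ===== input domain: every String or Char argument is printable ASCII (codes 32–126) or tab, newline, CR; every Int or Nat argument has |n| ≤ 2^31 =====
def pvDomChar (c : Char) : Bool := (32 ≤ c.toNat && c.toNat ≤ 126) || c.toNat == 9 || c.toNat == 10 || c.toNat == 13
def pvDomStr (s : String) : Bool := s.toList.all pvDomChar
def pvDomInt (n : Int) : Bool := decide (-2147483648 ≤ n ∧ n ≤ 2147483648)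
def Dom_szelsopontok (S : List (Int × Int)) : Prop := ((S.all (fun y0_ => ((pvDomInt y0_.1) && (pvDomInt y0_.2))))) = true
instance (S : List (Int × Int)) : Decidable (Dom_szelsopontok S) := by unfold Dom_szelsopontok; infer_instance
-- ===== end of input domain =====

-- B replaces A's fused single-pass extrema loop by three independent built-in passes
-- (min, max, index on the x-coordinate list): objective 'idiomatic', same O(n) cost.

-- ===== PORT A =====
def szelsopontok (S : List (Int × Int)) : Int × Int :=
  match S with
  | [] => (0, 0)  -- Python: S[0] raises IndexError here; excluded by Pre_szelsopontok
  | s :: _ =>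
    let st := S.foldl
      (fun (st : (Int × Int) × (Int × Int) × Int × Int × Int) elem =>
        let p := st.1; let q := st.2.1; let k := st.2.2.1
        let i := st.2.2.2.1; let j := st.2.2.2.2
        let qj := if elem.1 > q.1 then (elem, k) else (q, j)
        let pi := if elem.1 < p.1 then (elem, k) else (p, i)
        (pi.1, qj.1, k + 1, pi.2, qj.2))
      ((s.1, s.2), (s.1, s.2), 0, 0, 0)
    (st.2.2.2.1, st.2.2.2.2)

-- ===== PORT B =====
def szelsopontok_alt (S : List (Int × Int)) : Int × Int :=
  let xs := S.map (fun p => p.1)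
  match PySem.List.min? xs (fun y => y), PySem.List.max? xs (fun y => y) with
  | some mn, some mx =>
      -- xs.index(mn) / xs.index(mx) always succeed since mn, mx ∈ xs; getD 0 is unreachable
      ((((PySem.List.index? xs mn).getD 0 : Nat) : Int),
       (((PySem.List.index? xs mx).getD 0 : Nat) : Int))
  | _, _ => (0, 0)  -- Python: min([]) raises ValueError here; excluded by Pre_szelsopontok

-- ===== PRECONDITION & SPEC =====
-- A raises IndexError on the empty list (S[0]); B raises ValueError there (min of an empty list).
def Pre_szelsopontok (S : List (Int × Int)) : Prop := S ≠ []
instance (S : List (Int × Int)) : Decidable (Pre_szelsopontok S) := by unfold Pre_szelsopontok; infer_instance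
def pvWitness_szelsopontok : (List (Int × Int)) := [(1, 2), (-3, 4), (1, 0)]

def Spec_szelsopontok (S : List (Int × Int)) (out : Int × Int) : Prop := out = szelsopontok_alt S
instance (S : List (Int × Int)) (out : Int × Int) : Decidable (Spec_szelsopontok S out) := by unfold Spec_szelsopontok; infer_instance

-- ===== CLAIM (what is proved, stated in full; the proofs are below) =====
def Claim_equal_szelsopontok : Prop := ∀ (S : List (Int × Int)), Dom_szelsopontok S → Pre_szelsopontok S → Spec_szelsopontok S (szelsopontok S)

-- ===== LEMMAS AND PROOFS =====

-- running first-argmin / first-argmax over a list of x-values, with accumulator (best, its index) and next index k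
def runLt : List Int → Int → Int → Int → Int × Int
  | [], m, i, _ => (m, i)
  | y :: t, m, i, k => if y < m then runLt t y k (k + 1) else runLt t m i (k + 1)

def runGt : List Int → Int → Int → Int → Int × Int
  | [], m, j, _ => (m, j)
  | y :: t, m, j, k => if m < y then runGt t y k (k + 1) else runGt t m j (k + 1)

theorem foldA_char (l : List (Int × Int)) :
    ∀ (p q : Int × Int) (k i j : Int),
    l.foldl
      (fun (st : (Int × Int) × (Int × Int) × Int × Int × Int) elem =>
        let p := st.1; let q := st.2.1; let k := st.2.2.1
        let i := st.2.2.2.1; let j := st.2.2.2.2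
        let qj := if elem.1 > q.1 then (elem, k) else (q, j)
        let pi := if elem.1 < p.1 then (elem, k) else (p, i)
        (pi.1, qj.1, k + 1, pi.2, qj.2))
      (p, q, k, i, j)
    = (let r := runLt (l.map Prod.fst) p.1 i k
       let s := runGt (l.map Prod.fst) q.1 j k
       ((l.foldl (fun a e => if e.1 < a.1 then e else a) p),
        (l.foldl (fun a e => if a.1 < e.1 then e else a) q),
        k + l.length, r.2, s.2))
    ∧ (runLt (l.map Prod.fst) p.1 i k).1 = (l.foldl (fun a e => if e.1 < a.1 then e else a) p).1
    ∧ (runGt (l.map Prod.fst) q.1 j k).1 = (l.foldl (fun a e => if a.1 < e.1 then e else a) q).1 := by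
  induction l with
  | nil => intro p q k i j; simp [runLt, runGt]
  | cons e t ih =>
    intro p q k i j
    simp only [List.foldl_cons, List.map_cons, runLt, runGt, List.length_cons]
    by_cases h1 : e.1 < p.1 <;> by_cases h2 : q.1 < e.1
    · obtain ⟨hA, hB, hC⟩ := ih e e (k + 1) k k
      simp [h1, h2, hA, hB, hC, gt_iff_lt]
      omega
    · obtain ⟨hA, hB, hC⟩ := ih e q (k + 1) k j
      simp [h1, h2, hA, hB, hC, gt_iff_lt]
      omega
    · obtain ⟨hA, hB, hC⟩ := ih p e (k + 1) i k
      simp [h1, h2, hA, hB, hC, gt_iff_lt]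
      omega
    · obtain ⟨hA, hB, hC⟩ := ih p q (k + 1) i j
      simp [h1, h2, hA, hB, hC, gt_iff_lt]
      omega

theorem runLt_index : ∀ (t pre : List Int) (x : Int) (i : Nat),
    (∀ a ∈ pre, x ≤ a) → PySem.List.index? pre x = some i →
    runLt t x (i : Int) (pre.length : Int)
      = (t.foldl min x, (((PySem.List.index? (pre ++ t) (t.foldl min x)).getD 0 : Nat) : Int)) := by
  intro t
  induction t with
  | nil =>
    intro pre x i hle hidx
    simp only [runLt, List.foldl_nil, List.append_nil, hidx, Option.getD_some]
  | cons y t ih =>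
    intro pre x i hle hidx
    simp only [runLt, List.foldl_cons]
    by_cases h : y < x
    · have hy : y ∉ pre := fun hm => absurd (hle y hm) (by omega)
      have hidx' : PySem.List.index? (pre ++ [y]) y = some pre.length :=
        PySem.List.index?_append_singleton_self pre y hy
      have hle' : ∀ a ∈ pre ++ [y], y ≤ a := by
        intro a ha; rcases List.mem_append.mp ha with h' | h'
        · exact le_of_lt (lt_of_lt_of_le h (hle a h'))
        · simp at h'; omega
      have := ih (pre ++ [y]) y pre.length hle' hidx'
      have hmin : min x y = y := by omega
      simpa [h, hmin, List.append_assoc, List.length_append] using this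
    · have hx : x ∈ pre := by
        rw [PySem.List.index?_eq_idxOf?] at hidx
        exact List.isSome_idxOf?.mp (by simp [hidx])
      have hidx' : PySem.List.index? (pre ++ [y]) x = some i := by
        rw [PySem.List.index?_append_of_mem _ hx]; exact hidx
      have hle' : ∀ a ∈ pre ++ [y], x ≤ a := by
        intro a ha; rcases List.mem_append.mp ha with h' | h'
        · exact hle a h'
        · simp at h'; omega
      have := ih (pre ++ [y]) x i hle' hidx'
      have hmin : min x y = x := by omega
      simpa [h, hmin, List.append_assoc, List.length_append] using this

theorem runGt_index : ∀ (t pre : List Int) (x : Int) (i : Nat),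
    (∀ a ∈ pre, a ≤ x) → PySem.List.index? pre x = some i →
    runGt t x (i : Int) (pre.length : Int)
      = (t.foldl max x, (((PySem.List.index? (pre ++ t) (t.foldl max x)).getD 0 : Nat) : Int)) := by
  intro t
  induction t with
  | nil =>
    intro pre x i hle hidx
    simp only [runGt, List.foldl_nil, List.append_nil, hidx, Option.getD_some]
  | cons y t ih =>
    intro pre x i hle hidx
    simp only [runGt, List.foldl_cons]
    by_cases h : x < y
    · have hy : y ∉ pre := fun hm => absurd (hle y hm) (by omega)
      have hidx' : PySem.List.index? (pre ++ [y]) y = some pre.length :=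
        PySem.List.index?_append_singleton_self pre y hy
      have hle' : ∀ a ∈ pre ++ [y], a ≤ y := by
        intro a ha; rcases List.mem_append.mp ha with h' | h'
        · exact le_of_lt (lt_of_le_of_lt (hle a h') h)
        · simp at h'; omega
      have := ih (pre ++ [y]) y pre.length hle' hidx'
      have hmax : max x y = y := by omega
      simpa [h, hmax, List.append_assoc, List.length_append] using this
    · have hx : x ∈ pre := by
        rw [PySem.List.index?_eq_idxOf?] at hidx
        exact List.isSome_idxOf?.mp (by simp [hidx])
      have hidx' : PySem.List.index? (pre ++ [y]) x = some i := by
        rw [PySem.List.index?_append_of_mem _ hx]; exact hidx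
      have hle' : ∀ a ∈ pre ++ [y], a ≤ x := by
        intro a ha; rcases List.mem_append.mp ha with h' | h'
        · exact hle a h'
        · simp at h'; omega
      have := ih (pre ++ [y]) x i hle' hidx'
      have hmax : max x y = x := by omega
      simpa [h, hmax, List.append_assoc, List.length_append] using this

-- ===== VERDICT (by name: the statement is the Claim_ definition above) =====
theorem szelsopontok_spec : Claim_equal_szelsopontok := by
  intro S _ hpre
  unfold Spec_szelsopontok
  match S with
  | [] => exact absurd rfl hpre
  | s :: t =>
    simp only [szelsopontok, szelsopontok_alt, List.map_cons,
      PySem.List.min?_id_cons, PySem.List.max?_id_cons, List.foldl_cons]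
    have hmin : min s.1 s.1 = s.1 := by omega
    have hA := (foldA_char t (s.1, s.2) (s.1, s.2) 1 0 0).1
    have hL := runLt_index (t.map Prod.fst) [s.1] s.1 0
      (by simp) (PySem.List.index?_cons_self _ _)
    have hG := runGt_index (t.map Prod.fst) [s.1] s.1 0
      (by simp) (PySem.List.index?_cons_self _ _)
    simp only [List.length_singleton, Nat.cast_one, Nat.cast_zero, List.singleton_append] at hL hG
    simp [gt_iff_lt, hA, hL, hG]
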